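-- pv_equiv track=rewrite | github.com/tomkooij/AdventOfCode | aoc2016/day7.py | split_hypernet_sequence
-- ===== SOURCE A (Python) =====
-- def split_string_brackets(s):
--     """ abc[xyz]ghf --> abc, xyz, ghf """
--     try:
--         first, next_part = s.split('[', 1)
--         second, third = next_part.split(']', 1)
--         return first, second, third
--     except ValueError:
--         return s, '', None
--
-- def split_hypernet_sequence(s):
--     A, B = [], []
--     while s is not None:
--         first, second, third = split_string_brackets(s)
--         A.append(first)
--         B.append(second)
--         s = third
--     return A, B
-- ===== SOURCE B (Python) =====
-- def split_hypernet_sequence(s):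
--     # one left-to-right character scan with an in/out-of-brackets state,
--     # instead of repeated str.split calls
--     A, B = [], []
--     sup = ''
--     hyp = None  # None = outside brackets, str = accumulating a hypernet
--     for ch in s:
--         if hyp is None:
--             if ch == '[':
--                 hyp = ''
--             else:
--                 sup += ch
--         elif ch == ']':
--             A.append(sup)
--             B.append(hyp)
--             sup = ''
--             hyp = None
--         else:
--             hyp += ch
--     if hyp is not None:
--         sup = sup + '[' + hyp
--     A.append(sup)
--     B.append('')
--     return A, B
-- ===== Notes on version B (the rewrite author's own statement) =====
-- stated objective: alternative
-- what changed: Replaced the while-loop of repeated two-part str.split calls under try/except with a single left-to-right character scan that keeps an inside/outside-brackets state, merging an unclosed opening bracket back into the final supernet.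
import Mathlib
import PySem

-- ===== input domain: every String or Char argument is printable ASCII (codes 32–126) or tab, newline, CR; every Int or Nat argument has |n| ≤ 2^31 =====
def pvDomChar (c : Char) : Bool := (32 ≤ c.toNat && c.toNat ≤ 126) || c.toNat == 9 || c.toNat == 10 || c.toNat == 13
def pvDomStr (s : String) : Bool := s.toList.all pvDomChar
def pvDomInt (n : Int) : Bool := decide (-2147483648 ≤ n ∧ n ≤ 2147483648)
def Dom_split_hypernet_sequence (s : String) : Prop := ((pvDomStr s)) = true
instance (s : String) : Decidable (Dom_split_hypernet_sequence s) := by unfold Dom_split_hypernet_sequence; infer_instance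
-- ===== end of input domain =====

-- B replaces A's while-loop of repeated str.split calls by a single left-to-right
-- character scan with an inside/outside-brackets state (objective: alternative).

-- ===== PORT A =====
-- split_string_brackets: first, next = s.split('[', 1); second, third = next.split(']', 1)
-- (Python's str.split(sep, 1) is PySem.Chars.splitOnMax; a 1-element result means the
-- tuple unpacking raised ValueError, caught as (s, '', None)).
def pvSplitStringBrackets (s : List Char) : List Char × List Char × Option (List Char) :=
  match PySem.Chars.splitOnMax s ['['] 1 with
  | [first, next_part] =>
    match PySem.Chars.splitOnMax next_part [']'] 1 with
    | [second, third] => (first, second, some third)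
    | _ => (s, [], none)
  | _ => (s, [], none)

-- characterization of splitOnMax for a 1-char separator and maxsplit 1 (termination
-- of the while loop below is proved from it, so it stays above the port)
lemma pvGoZero (c : Char) (fuel : Nat) (l cur : List Char) (acc : List (List Char)) :
    PySem.Chars.splitOnMax.go [c] fuel 0 l cur acc = ((cur.reverse ++ l) :: acc).reverse := by
  cases fuel <;> cases l <;> simp [PySem.Chars.splitOnMax.go]

lemma pvGoOne (c : Char) (fuel : Nat) (l cur : List Char) (acc : List (List Char))
    (h : l.length < fuel) :
    PySem.Chars.splitOnMax.go [c] fuel 1 l cur acc =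
      ((if c ∈ l then (l.dropWhile (· ≠ c)).tail :: (cur.reverse ++ l.takeWhile (· ≠ c)) :: acc
        else (cur.reverse ++ l) :: acc) : List (List Char)).reverse := by
  induction fuel generalizing l cur acc with
  | zero => omega
  | succ n ih =>
    cases l with
    | nil => simp [PySem.Chars.splitOnMax.go]
    | cons x rest =>
      by_cases hx : x = c
      · subst hx
        simp only [PySem.Chars.splitOnMax.go]
        simp [pvGoZero, List.isPrefixOf]
      · simp only [PySem.Chars.splitOnMax.go]
        have : ¬ ([c].isPrefixOf (x :: rest)) := by simp [List.isPrefixOf, Ne.symm hx]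
        simp only [this]
        rw [ih rest (x :: cur) acc (by simp at h ⊢; omega)]
        by_cases hc : c ∈ rest <;> simp [hc, hx, Ne.symm hx, List.takeWhile, List.dropWhile]

lemma pvSplitOnMax_one (c : Char) (l : List Char) :
    PySem.Chars.splitOnMax l [c] 1 =
      if c ∈ l then [l.takeWhile (· ≠ c), (l.dropWhile (· ≠ c)).tail] else [l] := by
  unfold PySem.Chars.splitOnMax
  rw [if_neg (by norm_num)]
  simp only [Int.toNat_one]
  rw [pvGoOne c (l.length + 1) l [] [] (by omega)]
  by_cases hc : c ∈ l <;> simp [hc]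

lemma pvSsb_eq (s : List Char) :
    pvSplitStringBrackets s =
      if '[' ∈ s then
        (if ']' ∈ (s.dropWhile (· ≠ '[')).tail then
          ((s.takeWhile (· ≠ '[')),
           (((s.dropWhile (· ≠ '[')).tail).takeWhile (· ≠ ']')),
           (some ((((s.dropWhile (· ≠ '[')).tail).dropWhile (· ≠ ']')).tail)))
         else (s, [], none))
      else (s, [], none) := by
  by_cases h1 : '[' ∈ s <;> by_cases h2 : ']' ∈ (s.dropWhile (· ≠ '[')).tail <;>
    · simp only [ne_eq, decide_not] at h2 ⊢
      simp [pvSplitStringBrackets, pvSplitOnMax_one, h1, h2]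

lemma pvSsb_some_lt (s f sec t : List Char)
    (h : pvSplitStringBrackets s = (f, sec, some t)) : t.length < s.length := by
  rw [pvSsb_eq] at h
  split_ifs at h with h1 h2
  · injection h with e1 e2
    injection e2 with e2 e3
    injection e3 with e3
    subst e3
    have hd1 : s.dropWhile (· ≠ '[') ≠ [] := by
      intro he
      rw [List.dropWhile_eq_nil_iff] at he
      have := he '[' h1
      simp at this
    have l1 : (s.dropWhile (· ≠ '[')).length ≤ s.length := List.length_dropWhile_le _ _
    have l2 : ((s.dropWhile (· ≠ '[')).tail).length = (s.dropWhile (· ≠ '[')).length - 1 :=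
      List.length_tail
    have l3 : ((((s.dropWhile (· ≠ '[')).tail).dropWhile (· ≠ ']')).tail).length ≤
        (((s.dropWhile (· ≠ '[')).tail).dropWhile (· ≠ ']')).length := by
      rw [List.length_tail]; omega
    have l4 : ((((s.dropWhile (· ≠ '[')).tail)).dropWhile (· ≠ ']')).length ≤
        ((s.dropWhile (· ≠ '[')).tail).length := List.length_dropWhile_le _ _
    have h0 : 0 < (s.dropWhile (· ≠ '[')).length := List.length_pos_iff.mpr hd1
    omega
  · simp at h
  · simp at h

-- the while loop of split_hypernet_sequence: s is the current remainder
def pvShsLoop (s : List Char) (A B : List (List Char)) : List (List Char) × List (List Char) :=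
  match h : pvSplitStringBrackets s with
  | (first, second, some third) => pvShsLoop third (A ++ [first]) (B ++ [second])
  | (first, second, none) => (A ++ [first], B ++ [second])
termination_by s.length
decreasing_by exact pvSsb_some_lt _ _ _ _ h

def split_hypernet_sequence (s : String) : List String × List String :=
  let r := pvShsLoop s.toList [] []
  (r.1.map String.ofList, r.2.map String.ofList)

-- ===== PORT B =====
-- one scan: state = ((A, B), current supernet, Option current hypernet)
def pvAltStep (st : (List (List Char) × List (List Char)) × List Char × Option (List Char))
    (ch : Char) : (List (List Char) × List (List Char)) × List Char × Option (List Char) :=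
  match st with
  | (AB, sup, none) =>
    if ch = '[' then (AB, sup, some []) else (AB, sup ++ [ch], none)
  | (AB, sup, some hyp) =>
    if ch = ']' then ((AB.1 ++ [sup], AB.2 ++ [hyp]), [], none)
    else (AB, sup, some (hyp ++ [ch]))

def split_hypernet_sequence_alt (s : String) : List String × List String :=
  match s.toList.foldl pvAltStep ((([], []), [], none)) with
  | (AB, sup, hyp) =>
    let sup' := match hyp with | none => sup | some h => sup ++ '[' :: h
    ((AB.1 ++ [sup']).map String.ofList, (AB.2 ++ [[]]).map String.ofList)

-- ===== PRECONDITION & SPEC =====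
def Spec_split_hypernet_sequence (s : String) (out : List String × List String) : Prop := out = split_hypernet_sequence_alt s
instance (s : String) (out : List String × List String) : Decidable (Spec_split_hypernet_sequence s out) := by unfold Spec_split_hypernet_sequence; infer_instance

-- ===== CLAIM (what is proved, stated in full; the proofs are below) =====
def Claim_equal_split_hypernet_sequence : Prop := ∀ (s : String), Dom_split_hypernet_sequence s → Spec_split_hypernet_sequence s (split_hypernet_sequence s)

-- ===== LEMMAS AND PROOFS =====

lemma pvShsLoop_some (s f sec t : List Char) (A B : List (List Char))
    (h : pvSplitStringBrackets s = (f, sec, some t)) :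
    pvShsLoop s A B = pvShsLoop t (A ++ [f]) (B ++ [sec]) := by
  rw [pvShsLoop]; split <;> rename_i h' <;> rw [h] at h' <;> injection h' with e1 e2 <;>
    injection e2 with e2 e3
  · subst e1; subst e2; injection e3 with e3; subst e3; rfl
  · exact absurd e3 (by simp)

lemma pvShsLoop_none (s f sec : List Char) (A B : List (List Char))
    (h : pvSplitStringBrackets s = (f, sec, none)) :
    pvShsLoop s A B = (A ++ [f], B ++ [sec]) := by
  rw [pvShsLoop]; split <;> rename_i h' <;> rw [h] at h' <;> injection h' with e1 e2 <;>
    injection e2 with e2 e3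
  · exact absurd e3 (by simp)
  · subst e1; subst e2; rfl

-- finishing step of B applied to a fold state, list level
def pvFinish (st : (List (List Char) × List (List Char)) × List Char × Option (List Char)) :
    List (List Char) × List (List Char) :=
  (st.1.1 ++ [st.2.1 ++ (match st.2.2 with | none => [] | some h => '[' :: h)], st.1.2 ++ [[]])

lemma pvFoldOutside (pre : List Char) (h : '[' ∉ pre) :
    ∀ (AB : List (List Char) × List (List Char)) (sup : List Char) (l : List Char),
      (pre ++ l).foldl pvAltStep (AB, sup, none) = l.foldl pvAltStep (AB, sup ++ pre, none) := by
  induction pre with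
  | nil => simp
  | cons x rest ih =>
    intro AB sup l
    have hx : x ≠ '[' := by simp at h; exact Ne.symm h.1
    have hr : '[' ∉ rest := by simp at h; exact h.2
    simp only [List.cons_append, List.foldl_cons, pvAltStep, if_neg hx]
    rw [ih hr AB (sup ++ [x]) l]
    simp

lemma pvFoldInside (mid : List Char) (h : ']' ∉ mid) :
    ∀ (AB : List (List Char) × List (List Char)) (sup hyp : List Char) (l : List Char),
      (mid ++ l).foldl pvAltStep (AB, sup, some hyp) =
        l.foldl pvAltStep (AB, sup, some (hyp ++ mid)) := by
  induction mid with
  | nil => simp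
  | cons x rest ih =>
    intro AB sup hyp l
    have hx : x ≠ ']' := by simp at h; exact Ne.symm h.1
    have hr : ']' ∉ rest := by simp at h; exact h.2
    simp only [List.cons_append, List.foldl_cons, pvAltStep, if_neg hx]
    rw [ih hr AB sup (hyp ++ [x]) l]
    simp

lemma pvFoldOutside' (pre : List Char) (h : '[' ∉ pre)
    (AB : List (List Char) × List (List Char)) (sup : List Char) :
    pre.foldl pvAltStep (AB, sup, none) = (AB, sup ++ pre, none) := by
  have := pvFoldOutside pre h AB sup []
  simpa using this

lemma pvFoldInside' (mid : List Char) (h : ']' ∉ mid)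
    (AB : List (List Char) × List (List Char)) (sup hyp : List Char) :
    mid.foldl pvAltStep (AB, sup, some hyp) = (AB, sup, some (hyp ++ mid)) := by
  have := pvFoldInside mid h AB sup hyp []
  simpa using this

lemma pvStepOpen (AB : List (List Char) × List (List Char)) (sup : List Char) :
    pvAltStep (AB, sup, none) '[' = (AB, sup, some []) := by simp [pvAltStep]

lemma pvStepClose (AB : List (List Char) × List (List Char)) (sup hyp : List Char) :
    pvAltStep (AB, sup, some hyp) ']' = ((AB.1 ++ [sup], AB.2 ++ [hyp]), [], none) := by
  simp [pvAltStep]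

-- decomposition at the first occurrence of c
lemma pvDecomp (c : Char) (l : List Char) (h : c ∈ l) :
    l = l.takeWhile (· ≠ c) ++ c :: (l.dropWhile (· ≠ c)).tail := by
  induction l with
  | nil => cases h
  | cons x rest ih =>
    by_cases hx : x = c
    · subst hx; simp
    · have hb : decide (x ≠ c) = true := by simp [hx]
      rw [List.takeWhile_cons, List.dropWhile_cons, hb]
      simp only [if_true, List.cons_append, List.cons.injEq, true_and]
      exact ih (by cases h with | head => exact absurd rfl hx | tail _ h => exact h)

lemma pvNotMemTakeWhile (c : Char) (l : List Char) : c ∉ l.takeWhile (· ≠ c) := by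
  intro hmem
  have := List.mem_takeWhile_imp hmem
  simp at this

-- main invariant: A's loop equals B's fold plus the finishing step
lemma pvMain (s : List Char) : ∀ (A B : List (List Char)),
    pvShsLoop s A B = pvFinish (s.foldl pvAltStep ((A, B), [], none)) := by
  induction hn : s.length using Nat.strong_induction_on generalizing s with
  | _ n ih =>
  intro A B
  by_cases h1 : '[' ∈ s
  · -- s = pre ++ '[' :: rest
    set pre := s.takeWhile (· ≠ '[') with hpre
    set rest := (s.dropWhile (· ≠ '[')).tail with hrest
    have hdec : s = pre ++ '[' :: rest := pvDecomp _ _ h1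
    have hpre_no : '[' ∉ pre := pvNotMemTakeWhile _ _
    by_cases h2 : ']' ∈ rest
    · -- success: rest = mid ++ ']' :: suf
      set mid := rest.takeWhile (· ≠ ']') with hmid
      set suf := (rest.dropWhile (· ≠ ']')).tail with hsuf
      have hdec2 : rest = mid ++ ']' :: suf := pvDecomp _ _ h2
      have hmid_no : ']' ∉ mid := pvNotMemTakeWhile _ _
      have hssb : pvSplitStringBrackets s = (pre, mid, some suf) := by
        rw [pvSsb_eq, if_pos h1, if_pos h2]
      have hlt : suf.length < s.length := pvSsb_some_lt s _ _ _ hssb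
      rw [pvShsLoop_some s pre mid suf A B hssb]
      rw [ih suf.length (hn ▸ hlt) suf rfl]
      conv_rhs => rw [hdec, hdec2]
      rw [pvFoldOutside pre hpre_no, List.foldl_cons, pvStepOpen,
        pvFoldInside mid hmid_no, List.foldl_cons, pvStepClose]
      simp
    · -- '[' present but no closing ']' after it
      have hssb : pvSplitStringBrackets s = (s, [], none) := by
        rw [pvSsb_eq, if_pos h1, if_neg h2]
      rw [pvShsLoop_none s s [] A B hssb]
      conv_rhs => rw [hdec]
      rw [pvFoldOutside pre hpre_no, List.foldl_cons, pvStepOpen, pvFoldInside' rest h2]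
      simp [pvFinish, hdec]
  · -- no '[' at all
    have hssb : pvSplitStringBrackets s = (s, [], none) := by
      rw [pvSsb_eq, if_neg h1]
    rw [pvShsLoop_none s s [] A B hssb]
    rw [pvFoldOutside' s h1 (A, B) []]
    simp [pvFinish]

-- ===== VERDICT (by name: the statement is the Claim_ definition above) =====
theorem split_hypernet_sequence_spec : Claim_equal_split_hypernet_sequence := by
  intro s _
  unfold Spec_split_hypernet_sequence split_hypernet_sequence split_hypernet_sequence_alt
  rw [pvMain s.toList [] []]
  obtain ⟨⟨Af, Bf⟩, sup, hyp⟩ := s.toList.foldl pvAltStep (([], []), [], none)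
  cases hyp <;> simp [pvFinish]
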